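-- pv_equiv track=rewrite | github.com/MarinaJim/CodeRL_DPO | helpful_files/plot_model_loss.py | get_grouped_losses
-- ===== SOURCE A (Python) =====
-- def get_grouped_losses(losses):
--     grouped_losses = {}
--     for loss in losses:
--         if loss["epoch"] in grouped_losses:
--             grouped_losses[loss["epoch"]].append(loss["loss"])
--         else:
--             grouped_losses[loss["epoch"]] = [loss["loss"]]
--
--     return grouped_losses
-- ===== SOURCE B (Python) =====
-- def get_grouped_losses(losses):
--     epochs = dict.fromkeys(loss["epoch"] for loss in losses)
--     return {e: [loss["loss"] for loss in losses if loss["epoch"] == e]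
--             for e in epochs}
-- ===== Notes on version B (the rewrite author's own statement) =====
-- stated objective: alternative
-- what changed: Replaces A's single accumulating pass (mutable dict of growing lists) with a two-phase strategy: dedup the epochs in order of first appearance, then build each group by filtering the full list per epoch.
import Mathlib
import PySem

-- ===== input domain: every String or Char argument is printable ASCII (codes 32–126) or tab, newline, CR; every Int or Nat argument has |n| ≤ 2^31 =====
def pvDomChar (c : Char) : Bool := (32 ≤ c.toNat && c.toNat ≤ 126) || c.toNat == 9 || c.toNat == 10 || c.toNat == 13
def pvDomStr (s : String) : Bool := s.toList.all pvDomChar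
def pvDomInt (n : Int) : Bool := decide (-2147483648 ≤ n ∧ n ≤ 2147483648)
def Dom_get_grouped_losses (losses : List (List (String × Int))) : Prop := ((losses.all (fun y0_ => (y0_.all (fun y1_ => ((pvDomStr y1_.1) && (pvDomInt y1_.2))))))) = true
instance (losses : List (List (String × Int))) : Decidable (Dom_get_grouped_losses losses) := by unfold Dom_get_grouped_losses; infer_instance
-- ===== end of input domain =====

-- B groups by dedup-then-filter instead of A's single accumulating pass; same return value on Pre_.
-- ===== PORT A =====
-- loss["epoch"] / loss["loss"]: first-match lookup on the association list; Pre_ guarantees the key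
-- is present, so the default 0 is never the result (Python raises KeyError exactly outside Pre_).
def pvKey (l : List (String × Int)) : Int := (PySem.Dict.mk l).getD "epoch" 0
def pvVal (l : List (String × Int)) : Int := (PySem.Dict.mk l).getD "loss" 0

def get_grouped_losses (losses : List (List (String × Int))) : List (Int × List Int) :=
  (losses.foldl (fun g loss =>
      if g.contains (pvKey loss) then
        g.modify (pvKey loss) [] (fun xs => xs ++ [pvVal loss])   -- grouped[e].append(v)
      else
        g.insert (pvKey loss) [pvVal loss]                        -- grouped[e] = [v]
    ) PySem.Dict.empty).items

-- ===== PORT B =====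
def get_grouped_losses_alt (losses : List (List (String × Int))) : List (Int × List Int) :=
  let epochs := PySem.List.dedup (losses.map pvKey)               -- dict.fromkeys(...)
  epochs.map (fun e => (e, (losses.filter (fun l => pvKey l == e)).map pvVal))

-- ===== PRECONDITION =====
-- Pre_: every record has the keys "epoch" and "loss"; on any other input Python A raises KeyError.
def Pre_get_grouped_losses (losses : List (List (String × Int))) : Prop :=
  ∀ l ∈ losses, "epoch" ∈ l.map Prod.fst ∧ "loss" ∈ l.map Prod.fst
instance (losses : List (List (String × Int))) : Decidable (Pre_get_grouped_losses losses) := by unfold Pre_get_grouped_losses; infer_instance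

def pvWitness_get_grouped_losses : (List (List (String × Int))) :=
  [[("epoch", 1), ("loss", 5)], [("epoch", 1), ("loss", 7)], [("epoch", 2), ("loss", 3)]]

-- ===== PRECONDITION & SPEC =====
def Spec_get_grouped_losses (losses : List (List (String × Int))) (out : List (Int × List Int)) : Prop := out = get_grouped_losses_alt losses
instance (losses : List (List (String × Int))) (out : List (Int × List Int)) : Decidable (Spec_get_grouped_losses losses out) := by unfold Spec_get_grouped_losses; infer_instance

-- ===== CLAIM (what is proved, stated in full; the proofs are below) =====
def Claim_equal_get_grouped_losses : Prop := ∀ (losses : List (List (String × Int))), Dom_get_grouped_losses losses → Pre_get_grouped_losses losses → Spec_get_grouped_losses losses (get_grouped_losses losses)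

-- ===== LEMMAS AND PROOFS =====

-- ===== VERDICT (by name: the statement is the Claim_ definition above) =====
-- A's branch (append-if-present / fresh-singleton-otherwise) is one Dict.modify step.
theorem step_eq_modify (g : PySem.Dict Int (List Int)) (e v : Int) :
    (if g.contains e then g.modify e [] (fun xs => xs ++ [v]) else g.insert e [v])
      = g.modify e [] (fun xs => xs ++ [v]) := by
  by_cases h : g.contains e = true
  · simp [h]
  · have h0 : g.getD e ([] : List Int) = [] :=
      PySem.Dict.getD_of_not_contains g [] (by simp_all)
    simp [h, PySem.Dict.modify, h0]

theorem get_grouped_losses_spec : Claim_equal_get_grouped_losses := by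
  intro losses _ _
  unfold Spec_get_grouped_losses get_grouped_losses get_grouped_losses_alt
  have hstep : losses.foldl (fun g loss =>
      if g.contains (pvKey loss) then g.modify (pvKey loss) [] (fun xs => xs ++ [pvVal loss])
      else g.insert (pvKey loss) [pvVal loss]) PySem.Dict.empty
      = losses.foldl (fun g loss => g.modify (pvKey loss) [] (fun xs => xs ++ [pvVal loss])) PySem.Dict.empty := by
    exact PySem.List.foldl_congr_mem losses _ _ _
      (fun g l _ => step_eq_modify g (pvKey l) (pvVal l))
  rw [hstep]
  set D := losses.foldl (fun g loss => g.modify (pvKey loss) [] (fun xs => xs ++ [pvVal loss])) PySem.Dict.empty with hD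
  have hnd : D.keys.Nodup := by
    rw [hD]
    exact PySem.Dict.nodup_keys_foldl_modify_key losses pvKey [] (fun _ l xs => xs ++ [pvVal l]) PySem.Dict.empty PySem.Dict.nodup_keys_empty
  have hkeys : D.keys = PySem.List.dedup (losses.map pvKey) := by
    rw [hD, PySem.Dict.keys_foldl_modify_key, PySem.List.dedup_eq_ofList]
    rfl
  have hget : ∀ e, D.getD e [] = (losses.filter (fun l => pvKey l == e)).map pvVal := by
    intro e
    have h := PySem.Dict.getD_foldl_modify_append
      (losses.map (fun q => (pvKey q, pvVal q))) PySem.Dict.empty e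
    rw [List.foldl_map] at h
    simpa [List.filter_map, Function.comp] using h
  rw [PySem.Dict.items_eq_map_keys D hnd [], hkeys]
  simp only [hget]
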